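-- pv_equiv track=rewrite | github.com/Mehmet-yilmaz0/communication-server-project | kriptoloji/route_cipher.py | _read_spiral_counterclockwise
-- ===== SOURCE A (Python) =====
-- def _read_spiral_counterclockwise(matrix: list) -> str:
--     """
--     Matrisi saat yönünün tersine spiral olarak okur.
--
--     Args:
--         matrix: Matris
--
--     Returns:
--         Okunan metin
--     """
--     if not matrix or not matrix[0]:
--         return ""
--
--     rows = len(matrix)
--     cols = len(matrix[0])
--     result = []
--
--     top, bottom = 0, rows - 1
--     left, right = 0, cols - 1
--
--     while top <= bottom and left <= right:
--         # Aşağı git (sol sütun)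
--         for i in range(top, bottom + 1):
--             result.append(matrix[i][left])
--         left += 1
--
--         # Sağa git (alt satır)
--         for j in range(left, right + 1):
--             result.append(matrix[bottom][j])
--         bottom -= 1
--
--         # Yukarı git (sağ sütun) - eğer hala sütun varsa
--         if left <= right:
--             for i in range(bottom, top - 1, -1):
--                 result.append(matrix[i][right])
--             right -= 1
--
--         # Sola git (üst satır) - eğer hala satır varsa
--         if top <= bottom:
--             for j in range(right, left - 1, -1):
--                 result.append(matrix[top][j])
--             top += 1
--
--     return ''.join(result)
-- ===== SOURCE B (Python) =====
-- def _read_spiral_counterclockwise(matrix: list) -> str: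
--     """Recursive peel: first column top-to-bottom, then rotate the rest 90
--     degrees clockwise and recurse."""
--     def peel(m):
--         if not m or not m[0]:
--             return []
--         col = [row[0] for row in m]
--         rest = [row[1:] for row in m]
--         rotated = [list(r) for r in zip(*rest[::-1])]
--         return col + peel(rotated)
--     return ''.join(peel(matrix))
-- ===== Notes on version B (the rewrite author's own statement) =====
-- stated objective: alternative
-- what changed: Replaces A's four-directional while loop over mutable top/bottom/left/right index bounds with a recursive peel: take the first column, rotate the remaining matrix 90 degrees clockwise (zip of the reversed rows) and recurse.
import Mathlib
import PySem

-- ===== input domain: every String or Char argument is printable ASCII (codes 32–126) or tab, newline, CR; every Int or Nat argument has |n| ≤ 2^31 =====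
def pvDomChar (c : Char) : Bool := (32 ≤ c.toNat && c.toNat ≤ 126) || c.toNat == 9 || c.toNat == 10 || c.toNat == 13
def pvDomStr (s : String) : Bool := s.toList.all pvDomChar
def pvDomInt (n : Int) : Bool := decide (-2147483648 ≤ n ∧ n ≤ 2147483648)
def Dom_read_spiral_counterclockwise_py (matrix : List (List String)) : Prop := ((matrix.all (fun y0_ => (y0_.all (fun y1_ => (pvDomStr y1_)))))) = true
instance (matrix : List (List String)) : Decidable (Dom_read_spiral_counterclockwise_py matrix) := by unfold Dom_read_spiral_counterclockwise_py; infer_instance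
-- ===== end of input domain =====

-- B reads the spiral by recursive peeling (first column, then rotate the rest 90° clockwise
-- via zip of the reversed rows, and recurse) instead of A's four-directional while loop over
-- mutable top/bottom/left/right index bounds; objective: alternative (similar cost, different
-- algorithm).


-- ===== PORT A =====
-- matrix[i][left] etc.: every index the loop evaluates is nonnegative and in range on
-- inputs satisfying Pre_ (Python raises IndexError exactly outside Pre_), so the
-- default-carrying pyGetD is exact there.
def pvGet (matrix : List (List String)) (i j : Int) : String :=
  PySem.List.pyGetD (PySem.List.pyGetD matrix i []) j ""

-- the while loop of A, state (top, bottom, left, right, result); the Nat argument is only a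
-- structural totality bound on the number of iterations (the loop shrinks the window each
-- time, so rows + cols iterations always suffice — the 0 branch is never reached from the
-- call below, as the proof of pvKey shows)
def pvALoop (matrix : List (List String)) (top bottom left right : Int)
    (result : List String) : Nat → List String
  | 0 => result
  | fuel + 1 =>
    if top ≤ bottom ∧ left ≤ right then
      -- down the left column
      let r1 := result ++ (PySem.List.pyRange top (bottom + 1) 1).map (fun i => pvGet matrix i left)
      -- right along the bottom row
      let r2 := r1 ++ (PySem.List.pyRange (left + 1) (right + 1) 1).map (fun j => pvGet matrix bottom j)
      if left + 1 ≤ right then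
        -- up the right column
        let r3 := r2 ++ (PySem.List.pyRange (bottom - 1) (top - 1) (-1)).map (fun i => pvGet matrix i right)
        if top ≤ bottom - 1 then
          -- left along the top row
          let r4 := r3 ++ (PySem.List.pyRange (right - 1) (left + 1 - 1) (-1)).map (fun j => pvGet matrix top j)
          pvALoop matrix (top + 1) (bottom - 1) (left + 1) (right - 1) r4 fuel
        else
          pvALoop matrix top (bottom - 1) (left + 1) (right - 1) r3 fuel
      else
        if top ≤ bottom - 1 then
          let r4 := r2 ++ (PySem.List.pyRange right (left + 1 - 1) (-1)).map (fun j => pvGet matrix top j)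
          pvALoop matrix (top + 1) (bottom - 1) (left + 1) right r4 fuel
        else
          pvALoop matrix top (bottom - 1) (left + 1) right r2 fuel
    else result

def read_spiral_counterclockwise_py (matrix : List (List String)) : String :=
  if matrix = [] ∨ matrix.headD [] = [] then ""
  else
    let rows : Int := matrix.length
    let cols : Int := (matrix.headD []).length
    PySem.Str.join "" (pvALoop matrix 0 (rows - 1) 0 (cols - 1) []
      (matrix.length + (matrix.headD []).length))

-- ===== PORT B =====
-- zip(*ls): truncating transposition, exactly as Python's zip computes it; the Nat argument
-- is a structural totality bound on the number of produced rows (zip stops at the shortest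
-- row, so any bound larger than some row's length is enough; the caller passes the length of
-- the first row + 1)
def pvZipStar (ls : List (List String)) : Nat → List (List String)
  | 0 => []
  | fuel + 1 =>
    if ls = [] ∨ ls.any (fun r => r.isEmpty) then []
    else (ls.map (fun r => r.headD "")) :: pvZipStar (ls.map (fun r => r.tail)) fuel

-- peel: first column, then recurse on the clockwise-rotated remainder; the Nat argument is a
-- structural totality bound on the number of peels (each peel consumes at least one cell, so
-- total cell count + 1 always suffices)
def pvBRec (m : List (List String)) : Nat → List String
  | 0 => []
  | fuel + 1 =>
    if m = [] ∨ m.headD [] = [] then []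
    else
      (m.map (fun row => row.headD "")) ++
        pvBRec (pvZipStar ((m.map (fun row => row.tail)).reverse)
          ((((m.map (fun row => row.tail)).reverse).headD []).length + 1)) fuel

def read_spiral_counterclockwise_py_alt (matrix : List (List String)) : String :=
  PySem.Str.join "" (pvBRec matrix ((matrix.map List.length).sum + 1))

-- ===== PRECONDITION & SPEC =====
-- Pre_ is exactly the set of inputs where A returns: A raises IndexError iff some row is
-- shorter than the first row (it reads every row out to the first row's width).
def Pre_read_spiral_counterclockwise_py (matrix : List (List String)) : Prop :=
  ∀ row ∈ matrix, (matrix.headD []).length ≤ row.length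
instance (matrix : List (List String)) : Decidable (Pre_read_spiral_counterclockwise_py matrix) := by
  unfold Pre_read_spiral_counterclockwise_py; infer_instance

def pvWitness_read_spiral_counterclockwise_py : List (List String) :=
  [["a", "b", "c"], ["d", "e", "f"], ["g", "h", "i"]]

def Spec_read_spiral_counterclockwise_py (matrix : List (List String)) (out : String) : Prop := out = read_spiral_counterclockwise_py_alt matrix
instance (matrix : List (List String)) (out : String) : Decidable (Spec_read_spiral_counterclockwise_py matrix out) := by unfold Spec_read_spiral_counterclockwise_py; infer_instance

-- ===== CLAIM (what is proved, stated in full; the proofs are below) =====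
def Claim_equal_read_spiral_counterclockwise_py : Prop := ∀ (matrix : List (List String)), Dom_read_spiral_counterclockwise_py matrix → Pre_read_spiral_counterclockwise_py matrix → Spec_read_spiral_counterclockwise_py matrix (read_spiral_counterclockwise_py matrix)

-- ===== LEMMAS AND PROOFS =====

-- total cell count of a matrix, and B with its canonical (always sufficient) bound
def pvSize (m : List (List String)) : Nat := (m.map List.length).sum

def pvRunB (m : List (List String)) : List String := pvBRec m (pvSize m + 1)

theorem pvSum_tail_le (ls : List (List String)) :
    ((ls.map (fun r => r.tail)).map List.length).sum ≤ (ls.map List.length).sum := by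
  induction ls with
  | nil => simp
  | cons a l ih =>
    simp only [List.map_cons, List.sum_cons]
    have : a.tail.length ≤ a.length := by cases a <;> simp
    omega

theorem pvSum_eq_of_no_empty (ls : List (List String))
    (hall : ¬ ls.any (fun r => r.isEmpty) = true) :
    (ls.map List.length).sum = ((ls.map (fun r => r.tail)).map List.length).sum + ls.length := by
  induction ls with
  | nil => simp
  | cons a l ih =>
    simp only [List.any_cons, Bool.or_eq_true, not_or] at hall
    have ha : a ≠ [] := by simpa [List.isEmpty_iff] using hall.1
    have := ih hall.2
    cases a with
    | nil => exact absurd rfl ha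
    | cons x xs => simp only [List.map_cons, List.sum_cons, List.length_cons, List.tail_cons] at *; omega

theorem pvZipStar_sum_le : ∀ (fuel : Nat) (ls : List (List String)),
    ((pvZipStar ls fuel).map List.length).sum ≤ (ls.map List.length).sum := by
  intro fuel
  induction fuel with
  | zero => intro ls; simp [pvZipStar]
  | succ f ih =>
    intro ls
    simp only [pvZipStar]
    split
    · simp
    · rename_i h
      rw [not_or] at h
      have heq := pvSum_eq_of_no_empty ls h.2
      have hrec := ih (ls.map (fun r => r.tail))
      simp only [List.map_cons, List.sum_cons, List.length_map]
      omega

theorem pvBRec_measure (m : List (List String)) (h : ¬(m = [] ∨ m.headD [] = [])) (zf : Nat) :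
    pvSize (pvZipStar ((m.map (fun r => r.tail)).reverse) zf) < pvSize m := by
  rw [not_or] at h
  have h1 := pvZipStar_sum_le zf ((m.map (fun r => r.tail)).reverse)
  have h2 : (((m.map (fun r => r.tail)).reverse).map List.length).sum
      = ((m.map (fun r => r.tail)).map List.length).sum := by
    rw [List.map_reverse, List.sum_reverse]
  cases m with
  | nil => exact absurd rfl h.1
  | cons a l =>
    have ha : a ≠ [] := by simpa using h.2
    have h3 := pvSum_tail_le l
    have h4 : a.tail.length < a.length := by
      cases a with | nil => exact absurd rfl ha | cons x xs => simp
    simp only [pvSize, List.map_cons, List.sum_cons] at *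
    omega

-- the bound is irrelevant once it is large enough
theorem pvBRec_fuel : ∀ (f : Nat), ∀ m : List (List String), pvSize m < f →
    pvBRec m f = pvRunB m := by
  intro f
  induction f using Nat.strong_induction_on with
  | _ f ih =>
    intro m hm
    cases f with
    | zero => omega
    | succ s =>
      by_cases hg : m = [] ∨ m.headD [] = []
      · simp only [pvBRec, pvRunB, if_pos hg]
      · have hlt := pvBRec_measure m hg
          ((((m.map (fun r => r.tail)).reverse).headD []).length + 1)
        simp only [pvBRec, pvRunB, if_neg hg]
        rw [ih s (by omega) _ (by omega), ih (pvSize m) (by omega) _ (by omega)]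

-- the n × c matrix with entries f i j
def pvGen (n c : Nat) (f : Nat → Nat → String) : List (List String) :=
  (List.range n).map (fun i => (List.range c).map (fun j => f i j))

theorem pvGen_congr {n c : Nat} {f f' : Nat → Nat → String}
    (h : ∀ i < n, ∀ j < c, f i j = f' i j) : pvGen n c f = pvGen n c f' := by
  unfold pvGen
  refine List.map_congr_left (fun i hi => ?_)
  exact List.map_congr_left (fun j hj => h i (List.mem_range.mp hi) j (List.mem_range.mp hj))

theorem pvHeadD_getD (r : List String) : r.headD "" = r.getD 0 "" := by
  cases r <;> simp

theorem pvGetD_tail (r : List String) (j : Nat) : r.tail.getD j "" = r.getD (j + 1) "" := by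
  cases r <;> simp

-- characterization of Python's zip(*ls) when every row has length ≥ c and some row exactly c
theorem pvZipStar_char (c : Nat) : ∀ (ls : List (List String)) (fuel : Nat), ls ≠ [] →
    (∀ r ∈ ls, c ≤ r.length) → (∃ r ∈ ls, r.length = c) → c < fuel →
    pvZipStar ls fuel = (List.range c).map (fun j => ls.map (fun r => r.getD j "")) := by
  induction c with
  | zero =>
    intro ls fuel _ _ hex hf
    obtain ⟨f, rfl⟩ : ∃ f, fuel = f + 1 := ⟨fuel - 1, by omega⟩
    obtain ⟨r, hr, hlen⟩ := hex
    rw [pvZipStar, if_pos]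
    · simp
    · right
      rw [List.any_eq_true]
      exact ⟨r, hr, by simpa [List.isEmpty_iff, List.length_eq_zero_iff] using hlen⟩
  | succ c ih =>
    intro ls fuel hne hall hex hf
    obtain ⟨f, rfl⟩ : ∃ f, fuel = f + 1 := ⟨fuel - 1, by omega⟩
    have hguard : ¬(ls = [] ∨ ls.any (fun r => r.isEmpty) = true) := by
      rw [not_or]
      refine ⟨hne, ?_⟩
      rw [List.any_eq_true]
      rintro ⟨r, hr, hemp⟩
      have := hall r hr
      rw [List.isEmpty_iff] at hemp
      simp [hemp] at this
    rw [pvZipStar, if_neg hguard]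
    rw [List.range_succ_eq_map, List.map_cons, List.map_map]
    refine congrArg₂ _ ?_ ?_
    · exact List.map_congr_left (fun r _ => pvHeadD_getD r)
    · have hrec := ih (ls.map (fun r => r.tail)) f (by simpa using hne)
        (by
          rintro r' hr'
          rw [List.mem_map] at hr'
          obtain ⟨r, hr, rfl⟩ := hr'
          have := hall r hr
          cases r with
          | nil => simp at this
          | cons x xs => simpa using this)
        (by
          obtain ⟨r, hr, hlen⟩ := hex
          exact ⟨r.tail, List.mem_map_of_mem hr, by
            cases r with
            | nil => simp at hlen
            | cons x xs => simpa using hlen⟩)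
        (by omega)
      rw [hrec]
      refine List.map_congr_left (fun j _ => ?_)
      rw [List.map_map]
      exact List.map_congr_left (fun r _ => pvGetD_tail r j)

theorem pvRevMapRange {α : Type} (n : Nat) (h : Nat → α) :
    ((List.range n).map h).reverse = (List.range n).map (fun i => h (n - 1 - i)) := by
  apply List.ext_getElem
  · simp
  · intro i h1 h2
    simp only [List.getElem_reverse, List.getElem_map, List.getElem_range,
      List.length_map, List.length_range] at *

theorem pvMap_eq_map_range (M : List (List String)) (F : List String → String) :
    M.map F = (List.range M.length).map (fun i => F (M.getD i [])) := by
  induction M with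
  | nil => simp
  | cons a l ih =>
    simp only [List.map_cons, List.length_cons, List.range_succ_eq_map, List.map_map]
    refine congrArg₂ _ rfl ?_
    rw [ih]
    exact List.map_congr_left (fun i _ => by simp)

theorem pvBRec_gen_nil {n c : Nat} (f : Nat → Nat → String) (fuel : Nat) (h : n = 0 ∨ c = 0) :
    pvBRec (pvGen n c f) fuel = [] := by
  cases fuel with
  | zero => rw [pvBRec]
  | succ fz =>
    rcases h with h | h
    · subst h
      rw [pvBRec, if_pos]
      simp [pvGen]
    · subst h
      cases n with
      | zero => rw [pvBRec, if_pos]; simp [pvGen]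
      | succ m =>
        rw [pvBRec, if_pos]
        right
        simp [pvGen, List.range_succ_eq_map]

theorem pvRunB_gen_nil {n c : Nat} (f : Nat → Nat → String) (h : n = 0 ∨ c = 0) :
    pvRunB (pvGen n c f) = [] := pvBRec_gen_nil f _ h

theorem pvGen_size (n c : Nat) (f : Nat → Nat → String) : pvSize (pvGen n c f) = n * c := by
  simp only [pvSize, pvGen, List.map_map]
  rw [show ((List.length ∘ fun i => (List.range c).map (fun j => f i j)) : Nat → Nat)
        = (fun _ => c) from funext (fun i => by simp)]
  rw [List.map_const', List.sum_replicate, smul_eq_mul, List.length_range]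

theorem pvALoop_stop (matrix : List (List String)) (top bottom left right : Int)
    (result : List String) (fuel : Nat) (h : ¬(top ≤ bottom ∧ left ≤ right)) :
    pvALoop matrix top bottom left right result fuel = result := by
  cases fuel with
  | zero => rw [pvALoop]
  | succ f => rw [pvALoop, if_neg h]

-- one peel step of B on an explicit n × c matrix
theorem pvLStep (n c : Nat) (f : Nat → Nat → String) (h : n = 0 ∨ 1 ≤ c) :
    pvRunB (pvGen n c f)
      = (List.range n).map (fun i => f i 0)
        ++ pvRunB (pvGen (c - 1) n (fun j i => f (n - 1 - i) (j + 1))) := by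
  rcases Nat.eq_zero_or_pos n with hn | hn
  · subst hn
    rw [pvRunB_gen_nil f (Or.inl rfl), pvRunB_gen_nil _ (Or.inr rfl)]
    simp
  have hc : 1 ≤ c := h.resolve_left (by omega)
  have hguard : ¬(pvGen n c f = [] ∨ (pvGen n c f).headD [] = []) := by
    rw [not_or]
    constructor
    · simp [pvGen]
      omega
    · obtain ⟨m, rfl⟩ := Nat.exists_eq_add_of_lt hn
      simp only [pvGen, List.range_succ_eq_map, List.map_cons, List.headD_cons]
      simp
      omega
  rw [pvRunB, pvBRec, if_neg hguard]
  have htail : ∀ g : Nat → String, ((List.range c).map g).tail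
      = (List.range (c - 1)).map (fun j => g (j + 1)) := by
    intro g
    cases c with
    | zero => omega
    | succ c' => simp [List.range_succ_eq_map, List.map_map]
  have hmaps : (pvGen n c f).map (fun row => row.tail)
      = (List.range n).map (fun i => (List.range (c - 1)).map (fun j => f i (j + 1))) := by
    rw [pvGen, List.map_map]
    exact List.map_congr_left (fun i _ => htail (f i))
  have hrev : ((pvGen n c f).map (fun row => row.tail)).reverse
      = (List.range n).map (fun i => (List.range (c - 1)).map (fun j => f (n - 1 - i) (j + 1))) := by
    rw [hmaps, pvRevMapRange]
  have hzip := pvZipStar_char (c - 1)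
    ((List.range n).map (fun i => (List.range (c - 1)).map (fun j => f (n - 1 - i) (j + 1))))
    ((((List.range n).map (fun i => (List.range (c - 1)).map (fun j => f (n - 1 - i) (j + 1)))).headD []).length + 1)
    (by simp; omega)
    (by
      rintro r hr
      rw [List.mem_map] at hr
      obtain ⟨i, _, rfl⟩ := hr
      simp)
    (by
      refine ⟨(List.range (c - 1)).map (fun j => f (n - 1 - 0) (j + 1)), ?_, by simp⟩
      exact List.mem_map_of_mem (by simp [List.mem_range]; omega))
    (by
      obtain ⟨m, rfl⟩ := Nat.exists_eq_add_of_lt hn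
      simp [List.range_succ_eq_map])
  rw [hrev, hzip]
  have hgen : (List.range (c - 1)).map (fun j =>
        ((List.range n).map (fun i => (List.range (c - 1)).map (fun j => f (n - 1 - i) (j + 1)))).map
          (fun r => r.getD j ""))
      = pvGen (c - 1) n (fun j i => f (n - 1 - i) (j + 1)) := by
    rw [pvGen]
    refine List.map_congr_left (fun j hj => ?_)
    rw [List.map_map]
    refine List.map_congr_left (fun i _ => ?_)
    simp only [Function.comp]
    exact PySem.List.getD_map_range _ (c - 1) j "" (List.mem_range.mp hj)
  rw [hgen]
  refine congrArg₂ _ ?_ ?_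
  · rw [pvGen, List.map_map]
    refine List.map_congr_left (fun i _ => ?_)
    simp only [Function.comp]
    rw [pvHeadD_getD, PySem.List.getD_map_range (f i) c 0 "" hc]
  · refine pvBRec_fuel _ _ ?_
    rw [pvGen_size]
    have h1 : pvSize (pvGen n c f) = n * c := pvGen_size n c f
    have h2 : (c - 1) * n < c * n :=
      Nat.mul_lt_mul_of_lt_of_le (by omega) le_rfl hn
    have h3 : c * n = n * c := Nat.mul_comm c n
    omega

theorem pvGet_natCast (M : List (List String)) (a b : Nat) :
    pvGet M (a : Int) (b : Int) = (M.getD a []).getD b "" := by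
  simp [pvGet, PySem.List.pyGetD_natCast]

theorem pvMap_pyRange_asc (a b : Int) (body : Int → String) :
    (PySem.List.pyRange a b 1).map body
      = (List.range (b - a).toNat).map (fun (i : Nat) => body (a + (i : Int))) := by
  rw [PySem.List.pyRange_one, List.map_map]; rfl

theorem pvMap_pyRange_desc (a b : Int) (body : Int → String) :
    (PySem.List.pyRange a b (-1)).map body
      = (List.range (a - b).toNat).map (fun (i : Nat) => body (a - (i : Int))) := by
  rw [PySem.List.pyRange_neg_one, List.map_map]; rfl

theorem pvG_congr (M : List (List String)) {a b a' b' : Nat} (ha : a = a') (hb : b = b') :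
    (M.getD a []).getD b "" = (M.getD a' []).getD b' "" := by rw [ha, hb]

theorem pvSegAscCol (M : List (List String)) (t0 j0 k : Nat) :
    (PySem.List.pyRange (t0 : Int) ((t0 : Int) + k) 1).map (fun i => pvGet M i (j0 : Int))
      = (List.range k).map (fun i => (M.getD (t0 + i) []).getD j0 "") := by
  rw [pvMap_pyRange_asc]
  rw [show (((t0 : Int) + k - t0).toNat) = k by omega]
  refine List.map_congr_left (fun i _ => ?_)
  rw [show (t0 : Int) + i = ((t0 + i : Nat) : Int) by push_cast; ring]
  exact pvGet_natCast M (t0 + i) j0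

theorem pvSegAscRow (M : List (List String)) (i0 l0 k : Nat) :
    (PySem.List.pyRange (l0 : Int) ((l0 : Int) + k) 1).map (fun j => pvGet M (i0 : Int) j)
      = (List.range k).map (fun j => (M.getD i0 []).getD (l0 + j) "") := by
  rw [pvMap_pyRange_asc]
  rw [show (((l0 : Int) + k - l0).toNat) = k by omega]
  refine List.map_congr_left (fun j _ => ?_)
  rw [show (l0 : Int) + j = ((l0 + j : Nat) : Int) by push_cast; ring]
  exact pvGet_natCast M i0 (l0 + j)

theorem pvSegDescCol (M : List (List String)) (b0 j0 k : Nat) (hk : k ≤ b0 + 1) :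
    (PySem.List.pyRange (b0 : Int) ((b0 : Int) - k) (-1)).map (fun i => pvGet M i (j0 : Int))
      = (List.range k).map (fun i => (M.getD (b0 - i) []).getD j0 "") := by
  rw [pvMap_pyRange_desc]
  rw [show (((b0 : Int) - ((b0 : Int) - k)).toNat) = k by omega]
  refine List.map_congr_left (fun i hi => ?_)
  have hi' := List.mem_range.mp hi
  rw [show (b0 : Int) - i = ((b0 - i : Nat) : Int) by push_cast [Nat.cast_sub (by omega : i ≤ b0)]; ring]
  exact pvGet_natCast M (b0 - i) j0

theorem pvSegDescRow (M : List (List String)) (i0 r0 k : Nat) (hk : k ≤ r0 + 1) :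
    (PySem.List.pyRange (r0 : Int) ((r0 : Int) - k) (-1)).map (fun j => pvGet M (i0 : Int) j)
      = (List.range k).map (fun j => (M.getD i0 []).getD (r0 - j) "") := by
  rw [pvMap_pyRange_desc]
  rw [show (((r0 : Int) - ((r0 : Int) - k)).toNat) = k by omega]
  refine List.map_congr_left (fun j hj => ?_)
  have hj' := List.mem_range.mp hj
  rw [show (r0 : Int) - j = ((r0 - j : Nat) : Int) by push_cast [Nat.cast_sub (by omega : j ≤ r0)]; ring]
  exact pvGet_natCast M i0 (r0 - j)

-- the loop of A on the index window [t, t+n) × [l, l+c) equals B on that submatrix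
theorem pvKey : ∀ (fuel : Nat), ∀ n c t l : Nat, ∀ M : List (List String), ∀ acc : List String,
    n + c ≤ fuel →
    pvALoop M t ((t : Int) + n - 1) l ((l : Int) + c - 1) acc fuel
      = acc ++ pvRunB (pvGen n c (fun i j => (M.getD (t + i) []).getD (l + j) "")) := by
  intro fuel
  induction fuel with
  | zero =>
    intro n c t l M acc hN
    have hn : n = 0 := by omega
    rw [pvALoop, pvRunB_gen_nil _ (Or.inl hn)]
    simp
  | succ N ih =>
    intro n c t l M acc hN
    rcases Nat.eq_zero_or_pos n with hn | hn
    · rw [pvALoop, if_neg (by omega), pvRunB_gen_nil _ (Or.inl hn)]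
      simp
    rcases Nat.eq_zero_or_pos c with hc | hc
    · rw [pvALoop, if_neg (by omega), pvRunB_gen_nil _ (Or.inr hc)]
      simp
    rw [pvALoop, if_pos ⟨by omega, by omega⟩]
    have hS1 : (PySem.List.pyRange (t : Int) ((t : Int) + n - 1 + 1) 1).map (fun i => pvGet M i (l : Int))
        = (List.range n).map (fun i => (M.getD (t + i) []).getD l "") := by
      rw [show ((t : Int) + n - 1 + 1) = (t : Int) + (n : Int) by ring]
      exact pvSegAscCol M t l n
    have hS2 : (PySem.List.pyRange ((l : Int) + 1) ((l : Int) + c - 1 + 1) 1).map (fun j => pvGet M ((t : Int) + n - 1) j)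
        = (List.range (c - 1)).map (fun j => (M.getD (t + n - 1) []).getD (l + 1 + j) "") := by
      rw [show ((l : Int) + 1) = (((l + 1 : Nat)) : Int) by omega,
          show ((l : Int) + c - 1 + 1) = (((l + 1 : Nat)) : Int) + (((c - 1 : Nat)) : Int) by omega,
          show ((t : Int) + n - 1) = (((t + n - 1 : Nat)) : Int) by omega]
      exact pvSegAscRow M (t + n - 1) (l + 1) (c - 1)
    by_cases h2 : 2 ≤ c
    · rw [if_pos (show ((l : Int) + 1 ≤ (l : Int) + c - 1) by omega)]
      by_cases h3 : 2 ≤ n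
      · -- general case: all four sides, then recurse
        have hS3 : (PySem.List.pyRange ((t : Int) + n - 1 - 1) ((t : Int) - 1) (-1)).map (fun i => pvGet M i ((l : Int) + c - 1))
            = (List.range (n - 1)).map (fun i => (M.getD (t + n - 2 - i) []).getD (l + c - 1) "") := by
          rw [show ((t : Int) + n - 1 - 1) = (((t + n - 2 : Nat)) : Int) by omega,
              show ((t : Int) - 1) = (((t + n - 2 : Nat)) : Int) - (((n - 1 : Nat)) : Int) by omega,
              show ((l : Int) + c - 1) = (((l + c - 1 : Nat)) : Int) by omega]
          exact pvSegDescCol M (t + n - 2) (l + c - 1) (n - 1) (by omega)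
        rw [if_pos (show ((t : Int) ≤ (t : Int) + n - 1 - 1) by omega)]
        have hS4 : (PySem.List.pyRange ((l : Int) + c - 1 - 1) ((l : Int) + 1 - 1) (-1)).map (fun j => pvGet M (t : Int) j)
            = (List.range (c - 2)).map (fun j => (M.getD t []).getD (l + c - 2 - j) "") := by
          rw [show ((l : Int) + c - 1 - 1) = (((l + c - 2 : Nat)) : Int) by omega,
              show ((l : Int) + 1 - 1) = (((l + c - 2 : Nat)) : Int) - (((c - 2 : Nat)) : Int) by omega]
          exact pvSegDescRow M t (l + c - 2) (c - 2) (by omega)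
        rw [hS1, hS2, hS3, hS4]
        rw [show ((t : Int) + 1) = (((t + 1 : Nat)) : Int) by omega,
            show ((t : Int) + n - 1 - 1) = (((t + 1 : Nat)) : Int) + (((n - 2 : Nat)) : Int) - 1 by omega,
            show ((l : Int) + 1) = (((l + 1 : Nat)) : Int) by omega,
            show ((l : Int) + c - 1 - 1) = (((l + 1 : Nat)) : Int) + (((c - 2 : Nat)) : Int) - 1 by omega]
        rw [ih (n - 2) (c - 2) (t + 1) (l + 1) M _ (by omega)]
        rw [pvLStep n c _ (Or.inr (by omega)), pvLStep (c - 1) n _ (Or.inr (by omega)),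
            pvLStep (n - 1) (c - 1) _ (Or.inr (by omega)),
            pvLStep (c - 1 - 1) (n - 1) _ (Or.inr (by omega))]
        simp only [List.append_assoc]
        refine congrArg₂ _ rfl ?_
        refine congrArg₂ _ (List.map_congr_left (fun i hi => pvG_congr M (by omega) (by omega))) ?_
        refine congrArg₂ _ (List.map_congr_left (fun j hj => pvG_congr M (by omega) (by omega))) ?_
        refine congrArg₂ _ (List.map_congr_left (fun i hi =>
          pvG_congr M (by have := List.mem_range.mp hi; omega) (by omega))) ?_
        refine congrArg₂ _ (List.map_congr_left (fun j hj =>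
          pvG_congr M (by omega) (by have := List.mem_range.mp hj; omega))) ?_
        refine congrArg _ ?_
        refine (pvGen_congr (fun i hi j hj => pvG_congr M (by omega) (by omega))).symm
      · -- single row strip: n = 1
        have hS3e : (PySem.List.pyRange ((t : Int) + n - 1 - 1) ((t : Int) - 1) (-1)).map (fun i => pvGet M i ((l : Int) + c - 1)) = ([] : List String) := by
          rw [pvMap_pyRange_desc, show (((t : Int) + n - 1 - 1) - ((t : Int) - 1)).toNat = 0 by omega]
          simp
        rw [if_neg (show ¬((t : Int) ≤ (t : Int) + n - 1 - 1) by omega)]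
        rw [pvALoop_stop M (t : Int) ((t : Int) + n - 1 - 1) ((l : Int) + 1) ((l : Int) + c - 1 - 1) _ N (by omega)]
        rw [hS1, hS2, hS3e]
        rw [pvLStep n c _ (Or.inr (by omega)), pvLStep (c - 1) n _ (Or.inr (by omega)),
            pvRunB_gen_nil _ (Or.inl (show n - 1 = 0 by omega))]
        simp only [List.append_assoc, List.append_nil]
        refine congrArg₂ _ rfl ?_
        refine congrArg₂ _ (List.map_congr_left (fun i hi => pvG_congr M (by omega) (by omega))) ?_
        exact List.map_congr_left (fun j hj => pvG_congr M (by omega) (by omega))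
    · -- single column strip: c = 1
      rw [if_neg (show ¬((l : Int) + 1 ≤ (l : Int) + c - 1) by omega)]
      have hS2e : (PySem.List.pyRange ((l : Int) + 1) ((l : Int) + c - 1 + 1) 1).map (fun j => pvGet M ((t : Int) + n - 1) j) = ([] : List String) := by
        rw [pvMap_pyRange_asc, show (((l : Int) + c - 1 + 1) - ((l : Int) + 1)).toNat = 0 by omega]
        simp
      by_cases h3 : 2 ≤ n
      · rw [if_pos (show ((t : Int) ≤ (t : Int) + n - 1 - 1) by omega)]
        have hS4e : (PySem.List.pyRange ((l : Int) + c - 1) ((l : Int) + 1 - 1) (-1)).map (fun j => pvGet M (t : Int) j) = ([] : List String) := by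
          rw [pvMap_pyRange_desc, show (((l : Int) + c - 1) - ((l : Int) + 1 - 1)).toNat = 0 by omega]
          simp
        rw [pvALoop_stop M ((t : Int) + 1) ((t : Int) + n - 1 - 1) ((l : Int) + 1) ((l : Int) + c - 1) _ N (by omega)]
        rw [hS1, hS2e, hS4e]
        rw [pvLStep n c _ (Or.inr (by omega)), pvRunB_gen_nil _ (Or.inl (show c - 1 = 0 by omega))]
        simp only [List.append_nil]
        refine congrArg₂ _ rfl ?_
        exact List.map_congr_left (fun i hi => pvG_congr M (by omega) (by omega))
      · rw [if_neg (show ¬((t : Int) ≤ (t : Int) + n - 1 - 1) by omega)]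
        rw [pvALoop_stop M (t : Int) ((t : Int) + n - 1 - 1) ((l : Int) + 1) ((l : Int) + c - 1) _ N (by omega)]
        rw [hS1, hS2e]
        rw [pvLStep n c _ (Or.inr (by omega)), pvRunB_gen_nil _ (Or.inl (show c - 1 = 0 by omega))]
        simp only [List.append_nil]
        refine congrArg₂ _ rfl ?_
        exact List.map_congr_left (fun i hi => pvG_congr M (by omega) (by omega))

theorem pvSum_ge (m : List (List String)) (c : Nat) (h : ∀ r ∈ m, c ≤ r.length) :
    m.length * c ≤ pvSize m := by
  induction m with
  | nil => simp [pvSize]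
  | cons a l ih =>
    have := ih (fun r hr => h r (List.mem_cons_of_mem a hr))
    have ha := h a List.mem_cons_self
    simp only [pvSize, List.map_cons, List.sum_cons, List.length_cons, Nat.succ_mul] at *
    omega

-- on Pre_, B on the matrix itself equals B on its explicit rectangle of width cols
theorem pvBRec_eq_gen (M : List (List String)) (hne : M ≠ [])
    (hpre : ∀ row ∈ M, (M.headD []).length ≤ row.length) :
    pvRunB M
      = pvRunB (pvGen M.length (M.headD []).length (fun i j => (M.getD i []).getD j "")) := by
  rcases Nat.eq_zero_or_pos (M.headD []).length with hc | hc
  · rw [hc, pvRunB_gen_nil _ (Or.inr rfl), pvRunB, pvBRec, if_pos]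
    right
    rwa [← List.length_eq_zero_iff]
  have hguard : ¬(M = [] ∨ M.headD [] = []) := by
    rw [not_or]
    exact ⟨hne, by rw [← List.length_eq_zero_iff]; omega⟩
  rw [pvRunB, pvBRec, if_neg hguard]
  rw [pvLStep M.length (M.headD []).length _ (Or.inr hc)]
  have hlast : ((M.map (fun row => row.tail)).reverse).headD [] = (M.getLast (by exact hne)).tail := by
    rw [← List.map_reverse]
    cases hrev : M.reverse with
    | nil => simp at hrev; exact absurd hrev hne
    | cons a l =>
      have : a = M.getLast hne := by
        have := List.head_reverse (l := M) (by simp [hrev])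
        simpa [hrev] using this
      simp [this]
  have hzip := pvZipStar_char ((M.headD []).length - 1) ((M.map (fun row => row.tail)).reverse)
    ((((M.map (fun row => row.tail)).reverse).headD []).length + 1)
    (by simpa using hne)
    (by
      rintro r hr
      rw [List.mem_reverse, List.mem_map] at hr
      obtain ⟨row, hrow, rfl⟩ := hr
      have := hpre row hrow
      simp only [List.length_tail]
      omega)
    (by
      refine ⟨(M.headD []).tail, ?_, by simp [List.length_tail]⟩
      rw [List.mem_reverse]
      refine List.mem_map_of_mem ?_
      cases M with
      | nil => exact absurd rfl hne
      | cons a l => simp)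
    (by
      rw [hlast]
      have := hpre (M.getLast hne) (List.getLast_mem hne)
      simp only [List.length_tail]
      omega)
  rw [hzip]
  refine congrArg₂ _ ?_ ?_
  · rw [pvMap_eq_map_range M (fun row => row.headD "")]
    exact List.map_congr_left (fun i _ => pvHeadD_getD _)
  · have hrows : (List.range ((M.headD []).length - 1)).map (fun j =>
          ((M.map (fun row => row.tail)).reverse).map (fun r => r.getD j ""))
        = pvGen ((M.headD []).length - 1) M.length
            (fun j i => (M.getD (M.length - 1 - i) []).getD (j + 1) "") := by
      rw [pvGen]
      refine List.map_congr_left (fun j hj => ?_)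
      rw [List.map_reverse, List.map_map]
      simp only [Function.comp_def]
      have : (M.map (fun r => r.tail.getD j "")) = M.map (fun r => r.getD (j + 1) "") :=
        List.map_congr_left (fun r _ => pvGetD_tail r j)
      rw [this, pvMap_eq_map_range M (fun r => r.getD (j + 1) ""), pvRevMapRange]
    rw [hrows]
    refine pvBRec_fuel _ _ ?_
    rw [pvGen_size]
    have h1 := pvSum_ge M (M.headD []).length hpre
    have hR : 1 ≤ M.length := List.length_pos_iff.mpr hne
    have : ((M.headD []).length - 1) * M.length < M.length * (M.headD []).length := by
      calc ((M.headD []).length - 1) * M.length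
          < (M.headD []).length * M.length :=
            Nat.mul_lt_mul_of_lt_of_le (by omega) le_rfl hR
        _ = M.length * (M.headD []).length := Nat.mul_comm _ _
    omega

-- ===== VERDICT (by name: the statement is the Claim_ definition above) =====
theorem read_spiral_counterclockwise_py_spec : Claim_equal_read_spiral_counterclockwise_py := by
  unfold Claim_equal_read_spiral_counterclockwise_py
  intro matrix _hdom hpre
  unfold Pre_read_spiral_counterclockwise_py at hpre
  unfold Spec_read_spiral_counterclockwise_py
  unfold read_spiral_counterclockwise_py read_spiral_counterclockwise_py_alt
  by_cases hg : matrix = [] ∨ matrix.headD [] = []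
  · rw [if_pos hg, pvBRec, if_pos hg]
    rfl
  · rw [if_neg hg]
    rw [not_or] at hg
    show PySem.Str.join "" (pvALoop matrix 0 ((matrix.length : Int) - 1) 0
        (((matrix.headD []).length : Int) - 1) []
        (matrix.length + (matrix.headD []).length)) = _
    refine congrArg _ ?_
    have hkey := pvKey (matrix.length + (matrix.headD []).length) matrix.length
      ((matrix.headD []).length) 0 0 matrix [] le_rfl
    simp only [Nat.cast_zero, zero_add, List.nil_append] at hkey
    rw [hkey, ← pvBRec_eq_gen matrix hg.1 hpre]
    rfl
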